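-- pv_equiv track=rewrite | github.com/jkminder/MR-Eval | judge_audit/rejudge_runs.py | _match_model
-- ===== SOURCE A (Python) =====
-- def _match_model(name: str, pattern: str) -> bool:
--     """Substring match between filename and pattern with token boundaries.
--
--     Files follow `<eval>_<identifier>_llm_<timestamp>.json` (or
--     `_<timestamp>.json`). The identifier internal separator is `-` and the
--     outer separator is `_`. So `personabindingsft-cite-...-960gbsz` is one
--     token; the next char must be `_` (or end-of-string), NEVER `-` or
--     alphanumeric. This way `...960gbsz` does NOT match `...960gbsz-no-bad-data`,
--     and `baseline_pbsft` does NOT match `baseline_pbsft3`.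
--     """
--     idx = name.find(pattern)
--     while idx != -1:
--         end = idx + len(pattern)
--         if end == len(name) or name[end] in "_.":
--             return True
--         idx = name.find(pattern, idx + 1)
--     return False
-- ===== SOURCE B (Python) =====
-- def _match_model(name: str, pattern: str) -> bool:
--     # One boolean expression: pattern at end-of-string, or pattern followed by
--     # one of the boundary characters '_' / '.' somewhere in name.
--     return name.endswith(pattern) or (pattern + "_") in name or (pattern + ".") in name
-- ===== Notes on version B (the rewrite author's own statement) =====
-- stated objective: simpler
-- what changed: Replaced the find/while scan over successive match positions with a single boolean expression: endswith(pattern) handles the end-of-string boundary, and membership tests of pattern+'_' and pattern+'.' handle the separator boundaries.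
import Mathlib
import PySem

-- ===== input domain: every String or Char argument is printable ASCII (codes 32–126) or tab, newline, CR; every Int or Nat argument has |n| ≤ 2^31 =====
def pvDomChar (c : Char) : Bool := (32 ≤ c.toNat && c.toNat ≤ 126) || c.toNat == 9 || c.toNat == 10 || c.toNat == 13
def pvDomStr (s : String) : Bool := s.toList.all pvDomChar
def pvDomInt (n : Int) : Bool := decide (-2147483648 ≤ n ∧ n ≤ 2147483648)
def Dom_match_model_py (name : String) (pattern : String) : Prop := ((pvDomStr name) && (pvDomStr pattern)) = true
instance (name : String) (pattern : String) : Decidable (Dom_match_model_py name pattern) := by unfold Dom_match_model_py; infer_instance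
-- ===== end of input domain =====

-- B replaces A's find/while scan by one boolean expression over augmented patterns (objective: simpler).

-- ===== PORT A =====
-- `end == len(name) or name[end] in "_."`; for the single char name[end], `in "_."` is c='_' or c='.';
-- name[end] is only read when end < len(name) (the branch order keeps that), pyGet? is exact there.
def pvBoundaryA (name : List Char) (e : Int) : Bool :=
  (e == (name.length : Int)) ||
    (match PySem.List.pyGet? name e with
     | some c => c == '_' || c == '.'
     | none => false)

-- the while loop; idx strictly increases and is ≤ len(name), so fuel len+1 never runs out
def pvLoopA (name pattern : List Char) : Nat → Int → Bool
  | 0, _ => false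
  | fuel + 1, idx =>
    if idx = -1 then false
    else if pvBoundaryA name (idx + (pattern.length : Int)) then true
    else pvLoopA name pattern fuel (PySem.Chars.findFrom name pattern (idx + 1))

def match_model_py (name : String) (pattern : String) : Bool :=
  pvLoopA name.toList pattern.toList (name.toList.length + 1)
    (PySem.Chars.find name.toList pattern.toList)

-- ===== PORT B =====
def match_model_py_alt (name : String) (pattern : String) : Bool :=
  PySem.Str.endswith name pattern || PySem.Str.isIn (pattern ++ "_") name ||
    PySem.Str.isIn (pattern ++ ".") name

-- ===== PRECONDITION & SPEC =====
def Spec_match_model_py (name : String) (pattern : String) (out : Bool) : Prop := out = match_model_py_alt name pattern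
instance (name : String) (pattern : String) (out : Bool) : Decidable (Spec_match_model_py name pattern out) := by unfold Spec_match_model_py; infer_instance

-- ===== CLAIM (what is proved, stated in full; the proofs are below) =====
def Claim_equal_match_model_py : Prop := ∀ (name : String) (pattern : String), Dom_match_model_py name pattern → Spec_match_model_py name pattern (match_model_py name pattern)

-- ===== LEMMAS AND PROOFS =====

-- p followed by one extra char is a prefix iff p is and that char sits right after it
lemma pv_append_singleton_prefix {p t : List Char} {c : Char} :
    p ++ [c] <+: t ↔ p <+: t ∧ t[p.length]? = some c := by
  constructor
  · rintro ⟨u, rfl⟩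
    refine ⟨⟨c :: u, by simp⟩, ?_⟩
    rw [List.append_assoc]
    simp
  · rintro ⟨⟨r, rfl⟩, hc⟩
    rw [List.getElem?_append_right (le_refl _)] at hc
    simp at hc
    rcases r with _ | ⟨d, r⟩
    · simp at hc
    · simp at hc
      exact ⟨r, by simp [hc]⟩

-- suffix = occurrence ending at end-of-string
lemma pv_suffix_iff_drop {p t : List Char} :
    p <:+ t ↔ ∃ j : Nat, p <+: t.drop j ∧ j + p.length = t.length := by
  constructor
  · rintro ⟨u, rfl⟩
    exact ⟨u.length, by simp⟩
  · rintro ⟨j, hp, hl⟩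
    have hlen : p.length = (t.drop j).length := by simp; omega
    have := hp.eq_of_length hlen
    subst this
    exact List.drop_suffix _ _

-- the boundary test, in terms of the Nat position
lemma pv_boundaryA_iff (name : List Char) (m : Nat) :
    pvBoundaryA name (m : Int) = true ↔
      m = name.length ∨ name[m]? = some '_' ∨ name[m]? = some '.' := by
  unfold pvBoundaryA
  rw [PySem.List.pyGet?_natCast]
  rcases name[m]? with _ | c <;> simp

-- B expressed as "some occurrence with a boundary"
lemma pv_alt_iff (name pattern : String) :
    match_model_py_alt name pattern = true ↔
      ∃ j : Nat, pattern.toList <+: name.toList.drop j ∧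
        pvBoundaryA name.toList ((j : Int) + (pattern.toList.length : Int)) = true := by
  unfold match_model_py_alt
  rw [Bool.or_eq_true, Bool.or_eq_true, PySem.Str.endswith_eq, PySem.Chars.endswith_iff,
    PySem.Str.isIn_eq, PySem.Str.isIn_eq,
    ← PySem.Chars.exists_prefix_drop_iff_isIn, ← PySem.Chars.exists_prefix_drop_iff_isIn,
    String.toList_append, String.toList_append, pv_suffix_iff_drop,
    show ("_".toList) = ['_'] from rfl, show (".".toList) = ['.'] from rfl]
  have hb : ∀ j : Nat, (j : Int) + (pattern.toList.length : Int) = ((j + pattern.toList.length : Nat) : Int) := by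
    intro j; push_cast; ring
  constructor
  · rintro ((⟨j, hp, hl⟩ | ⟨j, hp⟩) | ⟨j, hp⟩)
    · exact ⟨j, hp, by rw [hb, pv_boundaryA_iff]; left; omega⟩
    · rw [pv_append_singleton_prefix] at hp
      refine ⟨j, hp.1, ?_⟩
      rw [hb, pv_boundaryA_iff]
      right; left
      rw [← hp.2, List.getElem?_drop]
    · rw [pv_append_singleton_prefix] at hp
      refine ⟨j, hp.1, ?_⟩
      rw [hb, pv_boundaryA_iff]
      right; right
      rw [← hp.2, List.getElem?_drop]
  · rintro ⟨j, hp, hbd⟩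
    rw [hb, pv_boundaryA_iff] at hbd
    rcases hbd with h | h | h
    · exact Or.inl (Or.inl ⟨j, hp, by omega⟩)
    · refine Or.inl (Or.inr ⟨j, ?_⟩)
      rw [pv_append_singleton_prefix, List.getElem?_drop]
      exact ⟨hp, h⟩
    · refine Or.inr ⟨j, ?_⟩
      rw [pv_append_singleton_prefix, List.getElem?_drop]
      exact ⟨hp, h⟩

-- the loop invariant: starting the search at `start`, the loop returns true
-- iff some occurrence at position ≥ start has a boundary after it
lemma pv_loopA_iff (n p : List Char) :
    ∀ (fuel start : Nat), start ≤ n.length → n.length + 1 ≤ fuel + start →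
      (pvLoopA n p fuel (PySem.Chars.findFrom n p (start : Int)) = true ↔
        ∃ j : Nat, start ≤ j ∧ p <+: n.drop j ∧
          pvBoundaryA n ((j : Int) + (p.length : Int)) = true) := by
  intro fuel
  induction fuel with
  | zero => intro start h1 h2; omega
  | succ fuel ih =>
    intro start h1 h2
    by_cases hi : PySem.Chars.findFrom n p (start : Int) = -1
    · rw [hi]
      have hnone := (PySem.Chars.findFrom_natCast_eq_neg_one_iff n p start h1).mp hi
      rw [show pvLoopA n p (fuel + 1) (-1) = false from by simp [pvLoopA]]
      simp only [Bool.false_eq_true, false_iff]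
      rintro ⟨j, hj, hp, -⟩
      apply hnone
      have hdd : List.drop j n = List.drop (j - start) (List.drop start n) := by
        rw [List.drop_drop]; congr 1; omega
      rw [hdd] at hp
      rcases hp with ⟨u, hu⟩
      exact ⟨List.take (j - start) (List.drop start n), u, by
        rw [List.append_assoc, hu, List.take_append_drop]⟩
    · obtain ⟨hle, hocc, hmin⟩ := PySem.Chars.findFrom_natCast_spec n p start h1 hi
      set i : Int := PySem.Chars.findFrom n p (start : Int) with hidef
      have hi0 : 0 ≤ i := le_trans (by exact_mod_cast Nat.zero_le start) hle
      have hicast : ((i.toNat : Nat) : Int) = i := Int.toNat_of_nonneg hi0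
      have hstarti : start ≤ i.toNat := by omega
      -- i ≤ n.length (from findFrom = start + find(drop start n) and find ≤ length)
      have hilen : i.toNat ≤ n.length := by
        have heq := PySem.Chars.findFrom_natCast n p start h1
        rw [← hidef] at heq
        rw [if_neg (by
          rw [PySem.Chars.find_eq_neg_one_iff]
          exact fun hinf => hi ((PySem.Chars.findFrom_natCast_eq_neg_one_iff n p start h1).mpr hinf))] at heq
        have hfl := PySem.Chars.find_le_length (n.drop start) p
        simp only [List.length_drop] at hfl
        omega
      rw [show pvLoopA n p (fuel + 1) i =
            (if i = -1 then false
             else if pvBoundaryA n (i + (p.length : Int)) then true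
             else pvLoopA n p fuel (PySem.Chars.findFrom n p (i + 1))) from rfl]
      rw [if_neg hi]
      have hbcast : i + (p.length : Int) = ((i.toNat + p.length : Nat) : Int) := by
        push_cast; omega
      by_cases hb : pvBoundaryA n (i + (p.length : Int)) = true
      · rw [if_pos hb]
        simp only [true_iff]
        refine ⟨i.toNat, hstarti, hocc, ?_⟩
        rw [show ((i.toNat : Int) + (p.length : Int)) = i + (p.length : Int) from by rw [hicast]]
        exact hb
      · rw [if_neg hb]
        have hplen2 : i.toNat + p.length ≤ n.length := by
          have := hocc.length_le; simp only [List.length_drop] at this; omega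
        have hne : i.toNat + p.length ≠ n.length := by
          intro hcontra
          apply hb
          rw [hbcast, pv_boundaryA_iff]
          exact Or.inl hcontra
        have hlt : i.toNat < n.length := by omega
        have hi1 : i + 1 = ((i.toNat + 1 : Nat) : Int) := by push_cast; omega
        rw [hi1, ih (i.toNat + 1) (by omega) (by omega)]
        constructor
        · rintro ⟨j, hj, hp, hbd⟩
          exact ⟨j, by omega, hp, hbd⟩
        · rintro ⟨j, hj, hp, hbd⟩
          refine ⟨j, ?_, hp, hbd⟩
          rcases Nat.lt_or_ge j i.toNat with hlt2 | hge
          · exact absurd hp (hmin j hj hlt2)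
          · rcases Nat.eq_or_lt_of_le hge with heq | hgt
            · exfalso
              apply hb
              rw [show i + (p.length : Int) = ((j : Int) + (p.length : Int)) from by
                rw [← hicast, heq]]
              exact hbd
            · omega

-- ===== VERDICT (by name: the statement is the Claim_ definition above) =====
theorem match_model_py_spec : Claim_equal_match_model_py := by
  intro name pattern _
  unfold Spec_match_model_py match_model_py
  rw [← PySem.Chars.findFrom_zero name.toList pattern.toList]
  have h := pv_loopA_iff name.toList pattern.toList (name.toList.length + 1) 0
    (Nat.zero_le _) (by omega)
  have h2 := pv_alt_iff name pattern
  simp only [Nat.cast_zero] at h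
  by_cases hz : pvLoopA name.toList pattern.toList (name.toList.length + 1)
      (PySem.Chars.findFrom name.toList pattern.toList 0) = true
  · rw [hz]
    symm
    rw [h2]
    obtain ⟨j, _, hp, hb⟩ := h.mp hz
    exact ⟨j, hp, hb⟩
  · rw [Bool.not_eq_true] at hz
    rw [hz]
    symm
    rw [Bool.eq_false_iff]
    intro hc
    obtain ⟨j, hp, hb⟩ := h2.mp hc
    rw [Bool.eq_false_iff] at hz
    exact hz (h.mpr ⟨j, Nat.zero_le _, hp, hb⟩)
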